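-- pv_equiv track=rewrite | github.com/ls1142/DSA-Group | src/Look.py | leaving_lift
-- ===== SOURCE A (Python) =====
-- def leaving_lift(lift, current_floor): # takes people out the lift if their at the floor requested
--     people_leaving = []
--     for people in lift:
--         if people == current_floor:
--             people_leaving.append(people)
--     for people in people_leaving:
--         lift.remove(people)
--     return lift
-- ===== SOURCE B (Python) =====
-- def leaving_lift(lift, current_floor):
--     while current_floor in lift:
--         lift.remove(current_floor)
--     return lift
-- ===== Notes on version B (the rewrite author's own statement) =====
-- stated objective: idiomatic
-- what changed: Replaces the two-pass collect-then-remove with a single repeated-scan loop that removes occurrences directly until none remains, keeping no intermediate list of leavers.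
import Mathlib
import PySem

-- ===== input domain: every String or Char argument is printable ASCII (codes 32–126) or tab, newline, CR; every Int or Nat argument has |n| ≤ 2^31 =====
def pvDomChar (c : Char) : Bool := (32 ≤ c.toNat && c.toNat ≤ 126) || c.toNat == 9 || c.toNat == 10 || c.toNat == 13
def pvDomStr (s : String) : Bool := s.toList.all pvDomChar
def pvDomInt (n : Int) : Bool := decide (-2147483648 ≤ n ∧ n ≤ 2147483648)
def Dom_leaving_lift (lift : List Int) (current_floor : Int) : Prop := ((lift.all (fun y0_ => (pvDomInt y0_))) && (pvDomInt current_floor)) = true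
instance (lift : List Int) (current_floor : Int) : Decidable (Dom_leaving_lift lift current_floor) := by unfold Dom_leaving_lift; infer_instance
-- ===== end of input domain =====

-- B replaces A's two-pass collect-then-remove with a repeated-scan removal loop (more idiomatic;
-- both mutate the list in place in Python and return the same list object, so return value = side effect).

-- ===== PORT A =====
-- first pass: collect leavers; second pass: lift.remove(people) for each leaver.
-- The `none` branch of remove? is unreachable (each collected leaver occurs in the current list).
def leaving_lift (lift : List Int) (current_floor : Int) : List Int :=
  let people_leaving : List Int :=
    lift.foldl (fun acc people => if people == current_floor then acc ++ [people] else acc) []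
  people_leaving.foldl (fun l people =>
    match PySem.List.remove? l people with
    | some l' => l'
    | none => l) lift

-- ===== PORT B =====
-- while current_floor in lift: lift.remove(current_floor)
def leaving_lift_alt (lift : List Int) (current_floor : Int) : List Int :=
  if lift.contains current_floor then
    leaving_lift_alt (lift.erase current_floor) current_floor
  else lift
termination_by lift.length
decreasing_by
  rename_i h
  have hm : current_floor ∈ lift := by simpa using h
  have h1 := List.length_erase_of_mem hm
  have h2 := List.length_pos_of_mem hm
  omega

-- ===== PRECONDITION & SPEC =====
def Spec_leaving_lift (lift : List Int) (current_floor : Int) (out : List Int) : Prop := out = leaving_lift_alt lift current_floor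
instance (lift : List Int) (current_floor : Int) (out : List Int) : Decidable (Spec_leaving_lift lift current_floor out) := by unfold Spec_leaving_lift; infer_instance

-- ===== CLAIM (what is proved, stated in full; the proofs are below) =====
def Claim_equal_leaving_lift : Prop := ∀ (lift : List Int) (current_floor : Int), Dom_leaving_lift lift current_floor → Spec_leaving_lift lift current_floor (leaving_lift lift current_floor)

-- ===== LEMMAS AND PROOFS =====

-- erasing one occurrence of c does not change the all-occurrences filter
theorem filter_erase_self (l : List Int) (c : Int) :
    (l.erase c).filter (fun x => x != c) = l.filter (fun x => x != c) := by
  induction l with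
  | nil => rfl
  | cons a t ih =>
    by_cases ha : a = c
    · subst ha; simp
    · simp [ha, ih]

-- B computes the all-occurrences filter
theorem alt_eq_filter (l : List Int) (c : Int) :
    leaving_lift_alt l c = l.filter (fun x => x != c) := by
  induction hl : l.length using Nat.strong_induction_on generalizing l with
  | _ n ih =>
    rw [leaving_lift_alt]
    by_cases hc : l.contains c
    · rw [if_pos hc]
      have hmem : c ∈ l := by simpa using hc
      have := ih (l.erase c).length (by
        subst hl
        have h1 := List.length_erase_of_mem hmem
        have h2 := List.length_pos_of_mem hmem
        omega) (l.erase c) rfl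
      rw [this, filter_erase_self]
    · rw [if_neg hc]
      have : ∀ x ∈ l, x ≠ c := by
        intro x hx hxc; exact hc (by simpa [hxc] using List.elem_iff.mpr hx)
      rw [List.filter_eq_self.mpr (by intro x hx; simpa using this x hx)]

-- removing k copies of c from a list containing exactly k copies gives the filter
theorem foldl_remove_replicate (c : Int) :
    ∀ (k : Nat) (l : List Int), l.count c = k →
      (List.replicate k c).foldl (fun l people =>
        match PySem.List.remove? l people with
        | some l' => l'
        | none => l) l = l.filter (fun x => x != c) := by
  intro k
  induction k with
  | zero =>
    intro l hcount
    have hne : ∀ x ∈ l, (x != c) = true := by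
      intro x hx
      have hxc : x ≠ c := by
        intro hxc; subst hxc
        have := List.count_pos_iff.mpr hx
        omega
      simpa using hxc
    simp only [List.replicate, List.foldl]
    exact (List.filter_eq_self.mpr hne).symm
  | succ k ih =>
    intro l hcount
    have hmem : c ∈ l := List.count_pos_iff.mp (by omega)
    rw [List.replicate_succ, List.foldl_cons,
        PySem.List.remove?_eq_some_erase l c hmem]
    have hcnt : (l.erase c).count c = k := by
      have := List.count_erase_self (a := c) (l := l)
      omega
    rw [ih (l.erase c) hcnt, filter_erase_self]

-- the collected leavers are exactly (count) copies of current_floor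
theorem filter_eq_replicate_count (l : List Int) (c : Int) :
    l.filter (fun x => x == c) = List.replicate (l.count c) c := by
  induction l with
  | nil => rfl
  | cons a t ih =>
    by_cases ha : a = c
    · subst ha; simp [ih, List.replicate_succ]
    · simp [ha, ih]

-- ===== VERDICT (by name: the statement is the Claim_ definition above) =====
theorem leaving_lift_spec : Claim_equal_leaving_lift := by
  intro lift current_floor _
  unfold Spec_leaving_lift leaving_lift
  rw [alt_eq_filter]
  simp only []
  rw [PySem.List.foldl_append_if_eq_filter, List.nil_append,
      filter_eq_replicate_count]
  exact foldl_remove_replicate current_floor (lift.count current_floor) lift rfl
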